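-- pv_equiv track=rewrite | github.com/pabloschwarzenberg/grader | hito2_ej3/hito2_ej3_ee8b1988c2f973bf501a9f5ce698ea60.py | encontrar_subcadenas_unicas
-- ===== SOURCE A (Python) =====
-- def encontrar_subcadenas_unicas(cadena, n):
--     subcadenas = set()
--     subcadenas_unicas = []
--
--     for i in range(len(cadena) - n + 1):
--         subcadena = cadena[i:i+n]
--         if subcadena in subcadenas:
--             if subcadena in subcadenas_unicas:
--                 subcadenas_unicas.remove(subcadena)
--         else:
--             subcadenas.add(subcadena)
--             subcadenas_unicas.append(subcadena)
--
--     return subcadenas_unicas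
-- ===== SOURCE B (Python) =====
-- def encontrar_subcadenas_unicas(cadena, n):
--     subs = [cadena[i:i+n] for i in range(len(cadena) - n + 1)]
--     counts = {}
--     for s in subs:
--         counts[s] = counts.get(s, 0) + 1
--     return [s for s in subs if counts[s] == 1]
-- ===== Notes on version B (the rewrite author's own statement) =====
-- stated objective: alternative
-- what changed: B builds the full list of length-n slices once, tallies occurrences in a counting dict in a second pass, and keeps the slices whose count is 1 - replacing A's single-pass set-membership plus unique-list maintenance with mid-list removals.
import Mathlib
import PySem

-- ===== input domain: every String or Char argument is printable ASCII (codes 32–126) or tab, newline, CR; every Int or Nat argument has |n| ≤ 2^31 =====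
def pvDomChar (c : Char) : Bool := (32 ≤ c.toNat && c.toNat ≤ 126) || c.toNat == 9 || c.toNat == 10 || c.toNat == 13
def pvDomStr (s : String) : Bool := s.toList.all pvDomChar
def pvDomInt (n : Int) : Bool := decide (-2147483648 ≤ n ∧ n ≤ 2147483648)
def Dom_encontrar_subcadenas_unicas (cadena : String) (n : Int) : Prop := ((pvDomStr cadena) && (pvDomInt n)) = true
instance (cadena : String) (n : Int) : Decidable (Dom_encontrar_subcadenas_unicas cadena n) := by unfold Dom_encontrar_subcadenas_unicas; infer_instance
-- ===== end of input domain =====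

-- B tallies all length-n slices in a counting dict and keeps those with count 1, instead of A's single-pass set+unique-list maintenance with removals (alternative decomposition, similar cost).


-- ===== PORT A =====
-- loop body of A: state = (subcadenas : set, subcadenas_unicas : list)
def pvStepA (st : PySem.Set String × List String) (sub : String) :
    PySem.Set String × List String :=
  if PySem.Set.contains st.1 sub then
    (st.1, if st.2.contains sub then (PySem.List.remove? st.2 sub).getD st.2 else st.2)
  else
    (PySem.Set.add st.1 sub, st.2 ++ [sub])

def encontrar_subcadenas_unicas (cadena : String) (n : Int) : List String :=
  ((PySem.List.pyRange 0 (PySem.Str.len cadena - n + 1) 1).foldl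
    (fun st i => pvStepA st (PySem.Str.slice cadena (some i) (some (i + n))))
    (PySem.Set.empty, [])).2

-- ===== PORT B =====
def encontrar_subcadenas_unicas_alt (cadena : String) (n : Int) : List String :=
  let subs := (PySem.List.pyRange 0 (PySem.Str.len cadena - n + 1) 1).map
    (fun i => PySem.Str.slice cadena (some i) (some (i + n)))
  let counts := subs.foldl (fun d s => PySem.Dict.modify d s 0 (· + 1)) (PySem.Dict.empty : PySem.Dict String Int)
  subs.filter (fun s => PySem.Dict.getD counts s 0 == 1)

-- ===== PRECONDITION & SPEC =====
def Spec_encontrar_subcadenas_unicas (cadena : String) (n : Int) (out : List String) : Prop := out = encontrar_subcadenas_unicas_alt cadena n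
instance (cadena : String) (n : Int) (out : List String) : Decidable (Spec_encontrar_subcadenas_unicas cadena n out) := by unfold Spec_encontrar_subcadenas_unicas; infer_instance

-- ===== CLAIM (what is proved, stated in full; the proofs are below) =====
def Claim_equal_encontrar_subcadenas_unicas : Prop := ∀ (cadena : String) (n : Int), Dom_encontrar_subcadenas_unicas cadena n → Spec_encontrar_subcadenas_unicas cadena n (encontrar_subcadenas_unicas cadena n)

-- ===== LEMMAS AND PROOFS =====

-- the "exactly once" filter B computes, as a function of the substring list
def pvUniq (xs : List String) : List String :=
  xs.filter (fun s => xs.count s == 1)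

lemma pvUniq_count_le_one (xs : List String) (a : String) : (pvUniq xs).count a ≤ 1 := by
  unfold pvUniq
  by_cases h : (xs.count a == 1)
  · rw [List.count_filter (p := fun s => xs.count s == 1) h]
    simp at h; omega
  · have : (xs.filter (fun s => xs.count s == 1)).count a = 0 := by
      refine List.count_eq_zero.mpr (fun hmem => ?_)
      exact h (List.mem_filter.mp hmem).2
    omega

lemma pvUniq_nodup (xs : List String) : (pvUniq xs).Nodup :=
  List.nodup_iff_count_le_one.mpr (pvUniq_count_le_one xs)

lemma pvUniq_append_singleton (p : List String) (x : String) :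
    pvUniq (p ++ [x]) =
      if x ∈ p then
        (if p.count x = 1 then (pvUniq p).erase x else pvUniq p)
      else pvUniq p ++ [x] := by
  unfold pvUniq
  rw [List.filter_append]
  by_cases hx : x ∈ p
  · have hc1 : 1 ≤ p.count x := List.one_le_count_iff.mpr hx
    have hsing : List.filter (fun s => ((p ++ [x]).count s == 1)) [x] = [] := by
      simp [List.count_append]
      omega
    rw [hsing, List.append_nil, if_pos hx]
    have hfilter : List.filter (fun s => ((p ++ [x]).count s == 1)) p
        = List.filter (fun s => s != x) (pvUniq p) := by
      unfold pvUniq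
      rw [List.filter_filter]
      apply List.filter_congr
      intro s hs
      by_cases hsx : s = x
      · subst hsx
        simp [List.count_append]
        omega
      · simp [List.count_append, hsx, Ne.symm hsx]
    rw [hfilter]
    by_cases hcnt : p.count x = 1
    · rw [if_pos hcnt]
      exact (List.Nodup.erase_eq_filter (pvUniq_nodup p) x).symm
    · rw [if_neg hcnt]
      apply List.filter_eq_self.mpr
      intro s hs
      have hmem : s ∈ p ∧ (p.count s == 1) := by
        simpa [pvUniq] using hs
      by_cases hsx : s = x
      · subst hsx; exact absurd (by simpa using hmem.2) hcnt
      · simp [hsx]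
  · have hsing : List.filter (fun s => ((p ++ [x]).count s == 1)) [x] = [x] := by
      simp [List.count_append, List.count_eq_zero_of_not_mem hx]
    rw [hsing, if_neg hx]
    congr 1
    apply List.filter_congr
    intro s hs
    have hsx : s ≠ x := fun h => hx (h ▸ hs)
    simp [List.count_append, Ne.symm hsx]

lemma pvLoopA_eq (xs : List String) :
    xs.foldl pvStepA (PySem.Set.empty, []) = (PySem.Set.ofList xs, pvUniq xs) := by
  induction xs using List.reverseRecOn with
  | nil => rfl
  | append_singleton p x ih =>
    rw [List.foldl_append, ih, List.foldl_cons, List.foldl_nil,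
        PySem.Set.ofList_append_singleton, pvUniq_append_singleton]
    by_cases hx : x ∈ p
    · have hmem : x ∈ PySem.Set.ofList p := (PySem.Set.mem_ofList p x).mpr hx
      by_cases hcnt : p.count x = 1
      · have hxu : x ∈ pvUniq p := by
          simp [pvUniq, hx, hcnt]
        simp only [pvStepA]
        rw [PySem.List.remove?_eq_some_erase _ x hxu]
        simp [hmem, hx, hcnt, hxu]
      · have hxu : x ∉ pvUniq p := by
          simp [pvUniq, hcnt]
        simp [pvStepA, hmem, hx, hcnt, hxu]
    · have hmem : x ∉ PySem.Set.ofList p := fun h => hx ((PySem.Set.mem_ofList p x).mp h)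
      simp [pvStepA, hmem, hx]

-- ===== VERDICT (by name: the statement is the Claim_ definition above) =====
theorem encontrar_subcadenas_unicas_spec : Claim_equal_encontrar_subcadenas_unicas := by
  intro cadena n _
  unfold Spec_encontrar_subcadenas_unicas encontrar_subcadenas_unicas
    encontrar_subcadenas_unicas_alt
  rw [← List.foldl_map, pvLoopA_eq]
  simp only [pvUniq]
  refine List.filter_congr (fun s hs => ?_)
  rw [PySem.Dict.getD_foldl_modify_add_one, PySem.Dict.getD_empty, zero_add]
  simp
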